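-- pv_equiv track=rewrite | github.com/idiotsen/consumer | scripts/etl/build_all.py | iter_quarter_keys
-- ===== SOURCE A (Python) =====
-- def iter_quarter_keys(start_year: int, start_quarter: int, end_year: int, end_quarter: int) -> list[tuple[int, int]]:
--     keys: list[tuple[int, int]] = []
--     year = start_year
--     quarter = start_quarter
--
--     while (year, quarter) <= (end_year, end_quarter):
--         keys.append((year, quarter))
--         if quarter == 4:
--             year += 1
--             quarter = 1
--         else:
--             quarter += 1
--
--     return keys
-- ===== SOURCE B (Python) =====
-- def iter_quarter_keys(start_year: int, start_quarter: int, end_year: int, end_quarter: int) -> list[tuple[int, int]]: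
--     keys: list[tuple[int, int]] = []
--     for year in range(start_year, end_year + 1):
--         first = start_quarter if year == start_year else 1
--         last = min(end_quarter, 4) if year == end_year else 4
--         keys.extend((year, q) for q in range(first, last + 1))
--     return keys
-- ===== Notes on version B (the rewrite author's own statement) =====
-- stated objective: alternative
-- what changed: Replaces A's single while loop over a (year,quarter) pair with a quarter==4 carry branch by a per-year decomposition: an outer range over the years and, for each year, one closed-form quarter range (start_quarter in the first year, end_quarter capped at 4 in the last); Pre_ excludes only the inputs where A's loop never terminates (start_quarter >= 5 with start_year < end_year).
-- intended difference: On start_year == end_year with 5 <= start_quarter <= end_quarter, A returns pseudo-quarter tuples such as [(y,5),(y,6)] that no calendar contains, while B returns [], the intended value since no quarter keys lie in that range. — e.g. on iter_quarter_keys(0, 5, 0, 6): A returns [(0, 5), (0, 6)], B returns []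
import Mathlib
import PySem

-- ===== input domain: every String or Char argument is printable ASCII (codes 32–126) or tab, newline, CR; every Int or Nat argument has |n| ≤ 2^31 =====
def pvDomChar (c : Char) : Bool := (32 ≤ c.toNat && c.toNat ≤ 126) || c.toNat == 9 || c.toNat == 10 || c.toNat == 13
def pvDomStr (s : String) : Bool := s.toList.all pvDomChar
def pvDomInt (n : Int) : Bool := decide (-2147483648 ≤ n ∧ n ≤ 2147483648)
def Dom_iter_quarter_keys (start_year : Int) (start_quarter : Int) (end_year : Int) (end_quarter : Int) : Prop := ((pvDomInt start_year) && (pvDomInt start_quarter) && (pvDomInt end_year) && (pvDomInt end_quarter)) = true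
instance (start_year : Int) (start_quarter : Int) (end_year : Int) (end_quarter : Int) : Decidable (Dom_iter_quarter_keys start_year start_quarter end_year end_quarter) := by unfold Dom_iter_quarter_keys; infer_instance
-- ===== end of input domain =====

-- B replaces A's carry-stepped (year,quarter) while loop by a per-year decomposition
-- with closed-form quarter ranges (objective: alternative).

-- ===== PORT A =====
-- A's while loop, made total with a fuel counter; on Pre_ inputs the fuel
-- strictly exceeds the number of iterations (proved below), so the port is A.
def pvLoopA (ey eq : Int) : Nat → Int → Int → List (Int × Int)
  | 0, _, _ => []
  | fuel+1, y, q =>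
    if y < ey ∨ (y = ey ∧ q ≤ eq) then
      (y, q) :: (if q = 4 then pvLoopA ey eq fuel (y+1) 1 else pvLoopA ey eq fuel y (q+1))
    else []

def iter_quarter_keys (start_year : Int) (start_quarter : Int) (end_year : Int) (end_quarter : Int) : List (Int × Int) :=
  pvLoopA end_year end_quarter
    ((4*(end_year - start_year)).natAbs + ((4:Int) - start_quarter).natAbs + (end_quarter - start_quarter).natAbs + 8)
    start_year start_quarter

-- ===== PORT B =====
def iter_quarter_keys_alt (start_year : Int) (start_quarter : Int) (end_year : Int) (end_quarter : Int) : List (Int × Int) :=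
  (PySem.List.pyRange start_year (end_year + 1) 1).foldl
    (fun keys year =>
      keys ++ (PySem.List.pyRange (if year = start_year then start_quarter else 1)
        ((if year = end_year then min end_quarter 4 else 4) + 1) 1).map (fun q => (year, q))) []

-- ===== PRECONDITION & SPEC =====
-- Pre_ excludes exactly the inputs on which A's while loop never terminates
-- (start_quarter ≥ 5 never hits the quarter == 4 rollover, so with
-- start_year < end_year the loop condition stays true forever).
def Pre_iter_quarter_keys (start_year : Int) (start_quarter : Int) (end_year : Int) (end_quarter : Int) : Prop :=
  ¬ (5 ≤ start_quarter ∧ start_year < end_year)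
instance (start_year : Int) (start_quarter : Int) (end_year : Int) (end_quarter : Int) : Decidable (Pre_iter_quarter_keys start_year start_quarter end_year end_quarter) := by unfold Pre_iter_quarter_keys; infer_instance
def pvWitness_iter_quarter_keys : Int × Int × Int × Int := (2020, 1, 2021, 4)

-- On start_year = end_year with 5 ≤ start_quarter ≤ end_quarter, A returns pseudo-quarter
-- tuples such as [(y,5),(y,6)] that no calendar contains, while B returns [], the intended
-- value since no quarter keys lie in that range.
def D_iter_quarter_keys (start_year : Int) (start_quarter : Int) (end_year : Int) (end_quarter : Int) : Prop :=
  start_year = end_year ∧ 5 ≤ start_quarter ∧ start_quarter ≤ end_quarter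
instance (start_year : Int) (start_quarter : Int) (end_year : Int) (end_quarter : Int) : Decidable (D_iter_quarter_keys start_year start_quarter end_year end_quarter) := by unfold D_iter_quarter_keys; infer_instance

def Spec_iter_quarter_keys (start_year : Int) (start_quarter : Int) (end_year : Int) (end_quarter : Int) (out : List (Int × Int)) : Prop := ¬ D_iter_quarter_keys start_year start_quarter end_year end_quarter → out = iter_quarter_keys_alt start_year start_quarter end_year end_quarter
instance (start_year : Int) (start_quarter : Int) (end_year : Int) (end_quarter : Int) (out : List (Int × Int)) : Decidable (Spec_iter_quarter_keys start_year start_quarter end_year end_quarter out) := by unfold Spec_iter_quarter_keys; infer_instance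

def pvDiffWitness_iter_quarter_keys : Int × Int × Int × Int := (0, 5, 0, 6)
def pvDiffWitnessOut_iter_quarter_keys : (List (Int × Int)) × (List (Int × Int)) := ([(0, 5), (0, 6)], [])

-- ===== CLAIM (what is proved, stated in full; the proofs are below) =====
def Claim_unchanged_iter_quarter_keys : Prop := ∀ (start_year : Int) (start_quarter : Int) (end_year : Int) (end_quarter : Int), Dom_iter_quarter_keys start_year start_quarter end_year end_quarter → Pre_iter_quarter_keys start_year start_quarter end_year end_quarter → Spec_iter_quarter_keys start_year start_quarter end_year end_quarter (iter_quarter_keys start_year start_quarter end_year end_quarter)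
def Claim_changed_iter_quarter_keys : Prop := Dom_iter_quarter_keys (pvDiffWitness_iter_quarter_keys.1) (pvDiffWitness_iter_quarter_keys.2.1) (pvDiffWitness_iter_quarter_keys.2.2.1) (pvDiffWitness_iter_quarter_keys.2.2.2) ∧ Pre_iter_quarter_keys (pvDiffWitness_iter_quarter_keys.1) (pvDiffWitness_iter_quarter_keys.2.1) (pvDiffWitness_iter_quarter_keys.2.2.1) (pvDiffWitness_iter_quarter_keys.2.2.2) ∧ D_iter_quarter_keys (pvDiffWitness_iter_quarter_keys.1) (pvDiffWitness_iter_quarter_keys.2.1) (pvDiffWitness_iter_quarter_keys.2.2.1) (pvDiffWitness_iter_quarter_keys.2.2.2) ∧ iter_quarter_keys (pvDiffWitness_iter_quarter_keys.1) (pvDiffWitness_iter_quarter_keys.2.1) (pvDiffWitness_iter_quarter_keys.2.2.1) (pvDiffWitness_iter_quarter_keys.2.2.2) = pvDiffWitnessOut_iter_quarter_keys.1 ∧ iter_quarter_keys_alt (pvDiffWitness_iter_quarter_keys.1) (pvDiffWitness_iter_quarter_keys.2.1) (pvDiffWitness_iter_quarter_keys.2.2.1) (pvDiffWitness_iter_quarter_keys.2.2.2)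 = pvDiffWitnessOut_iter_quarter_keys.2 ∧ pvDiffWitnessOut_iter_quarter_keys.1 ≠ pvDiffWitnessOut_iter_quarter_keys.2
def Claim_exact_iter_quarter_keys : Prop := ∀ (start_year : Int) (start_quarter : Int) (end_year : Int) (end_quarter : Int), Dom_iter_quarter_keys start_year start_quarter end_year end_quarter → Pre_iter_quarter_keys start_year start_quarter end_year end_quarter → D_iter_quarter_keys start_year start_quarter end_year end_quarter → iter_quarter_keys start_year start_quarter end_year end_quarter ≠ iter_quarter_keys_alt start_year start_quarter end_year end_quarter

-- ===== LEMMAS AND PROOFS =====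

-- last quarter A emits inside year z
def pvHi (ey eq z : Int) : Int := if z = ey then min eq 4 else 4

-- B's tail: the full years after the first, each contributing quarters 1..pvHi
def pvYears (ey eq a : Int) : List (Int × Int) :=
  (PySem.List.pyRange a (ey + 1) 1).flatMap
    (fun z => (PySem.List.pyRange 1 (pvHi ey eq z + 1) 1).map (fun q => (z, q)))

theorem pvLoopA_nil (ey eq y q : Int) (fuel : Nat) (hc : ¬ (y < ey ∨ (y = ey ∧ q ≤ eq))) :
    pvLoopA ey eq fuel y q = [] := by
  cases fuel with
  | zero => rfl
  | succ n => simp only [pvLoopA]; rw [if_neg hc]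

theorem pvYears_nil (ey eq a : Int) (h : ey < a) : pvYears ey eq a = [] := by
  unfold pvYears
  rw [PySem.List.pyRange_one_eq_nil (by omega : ey + 1 ≤ a)]
  rfl

-- A's walk from any canonical-or-lower quarter q ≤ 4 equals: the rest of year y,
-- then the per-year decomposition of the remaining years.
theorem pvLoopA_eq_years (ey eq : Int) :
    ∀ (fuel : Nat) (y q : Int), q ≤ 4 → y ≤ ey →
    ((ey - y)*4 + (4 - q) + 1).toNat ≤ fuel →
    pvLoopA ey eq fuel y q
      = (PySem.List.pyRange q (pvHi ey eq y + 1) 1).map (fun j => (y, j)) ++ pvYears ey eq (y+1) := by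
  intro fuel
  induction fuel with
  | zero =>
    intro y q hq hy hf
    exact absurd hf (by omega)
  | succ n ih =>
    intro y q hq hy hf
    by_cases hc : y < ey ∨ (y = ey ∧ q ≤ eq)
    · simp only [pvLoopA]
      rw [if_pos hc]
      have hqhi : q ≤ pvHi ey eq y := by
        unfold pvHi; rcases hc with h | ⟨h1, h2⟩ <;> split_ifs <;> omega
      rw [PySem.List.pyRange_one_cons (by omega : q < pvHi ey eq y + 1)]
      simp only [List.map_cons, List.cons_append]
      congr 1
      by_cases hq4 : q = 4
      · subst hq4
        rw [if_pos rfl]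
        have hhi4 : pvHi ey eq y ≤ 4 := by unfold pvHi; split_ifs <;> omega
        rw [PySem.List.pyRange_one_eq_nil (by omega : pvHi ey eq y + 1 ≤ 4 + 1)]
        simp only [List.map_nil, List.nil_append]
        by_cases hye : y = ey
        · subst hye
          rw [pvLoopA_nil y eq (y+1) 1 n (by omega), pvYears_nil y eq (y+1) (by omega)]
        · rw [ih (y+1) 1 (by norm_num) (by omega) (by omega)]
          unfold pvYears
          rw [PySem.List.pyRange_one_cons (by omega : y + 1 < ey + 1)]
          simp only [List.flatMap_cons]
      · rw [if_neg hq4, ih y (q+1) (by omega) hy (by omega)]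
    · have h1 : y = ey := by omega
      have h2 : eq < q := by omega
      have hhi : pvHi ey eq y < q := by unfold pvHi; subst h1; rw [if_pos rfl]; omega
      rw [pvLoopA_nil ey eq y q _ hc,
        PySem.List.pyRange_one_eq_nil (by omega : pvHi ey eq y + 1 ≤ q),
        pvYears_nil ey eq (y+1) (by omega)]
      rfl

-- ===== VERDICT (by name: the statement is the Claim_ definition above) =====
theorem iter_quarter_keys_spec : Claim_unchanged_iter_quarter_keys := by
  intro sy sq ey eq _hdom hpre hnd
  unfold Pre_iter_quarter_keys at hpre
  unfold D_iter_quarter_keys at hnd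
  unfold iter_quarter_keys iter_quarter_keys_alt
  by_cases hlt : ey < sy
  · rw [pvLoopA_nil ey eq sy sq _ (by omega),
      PySem.List.pyRange_one_eq_nil (by omega : ey + 1 ≤ sy)]
    rfl
  · by_cases hs4 : sq ≤ 4
    · -- main case: rest of the first year, then the per-year tail
      rw [pvLoopA_eq_years ey eq _ sy sq hs4 (by omega) (by omega),
        PySem.List.pyRange_one_cons (by omega : sy < ey + 1), List.foldl_cons,
        PySem.List.foldl_congr_mem (PySem.List.pyRange (sy+1) (ey+1) 1)
          (fun keys year =>
            keys ++ (PySem.List.pyRange (if year = sy then sq else 1)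
              ((if year = ey then min eq 4 else 4) + 1) 1).map (fun q => (year, q)))
          (fun keys year =>
            keys ++ (PySem.List.pyRange 1 (pvHi ey eq year + 1) 1).map (fun q => (year, q)))
          _
          (by
            intro acc z hz
            have hz' : sy + 1 ≤ z ∧ z < ey + 1 := PySem.List.mem_pyRange_one.mp hz
            dsimp only
            rw [if_neg (by omega : ¬ z = sy)]
            rfl),
        PySem.List.foldl_append_eq_flatMap]
      rw [if_pos rfl]
      unfold pvYears pvHi
      simp only [List.nil_append]
    · -- sq ≥ 5: Pre_ forces sy = ey, ¬D_ forces eq < sq; both sides are empty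
      have hse : sy = ey := by omega
      have heq : eq < sq := by omega
      subst hse
      rw [pvLoopA_nil sy eq sy sq _ (by omega)]
      have h1 : PySem.List.pyRange sy (sy + 1) 1 = [sy] := PySem.List.pyRange_one_singleton sy
      have h0 : PySem.List.pyRange sq (min eq 4 + 1) 1 =
          [] := PySem.List.pyRange_one_eq_nil (by omega)
      simp [h1, h0]

theorem iter_quarter_keys_changed : Claim_changed_iter_quarter_keys := by
  unfold Claim_changed_iter_quarter_keys; decide

theorem iter_quarter_keys_tight : Claim_exact_iter_quarter_keys := by
  intro sy sq ey eq _hdom _hpre hd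
  obtain ⟨h1, h2, h3⟩ := hd
  -- B is empty: the single year's quarter range is empty since min eq 4 < sq
  subst h1
  have hB : iter_quarter_keys_alt sy sq sy eq = [] := by
    unfold iter_quarter_keys_alt
    have h1 : PySem.List.pyRange sy (sy + 1) 1 = [sy] := PySem.List.pyRange_one_singleton sy
    have h0 : PySem.List.pyRange sq (min eq 4 + 1) 1 =
        [] := PySem.List.pyRange_one_eq_nil (by omega)
    simp [h1, h0]
  -- A is non-empty: the loop condition holds at the start, and the fuel is positive
  have hA : ∃ l, iter_quarter_keys sy sq sy eq = (sy, sq) :: l := by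
    unfold iter_quarter_keys
    obtain ⟨m, hm⟩ : ∃ m, (4*(sy - sy)).natAbs + ((4:Int) - sq).natAbs + (eq - sq).natAbs + 8 = m + 1 :=
      ⟨(4*(sy - sy)).natAbs + ((4:Int) - sq).natAbs + (eq - sq).natAbs + 7, by omega⟩
    rw [hm]
    simp only [pvLoopA]
    split_ifs with hcond
    all_goals first
      | exact ⟨_, rfl⟩
      | exact (hcond (Or.inr ⟨trivial, h3⟩)).elim
  obtain ⟨l, hl⟩ := hA
  rw [hl, hB]
  exact List.cons_ne_nil _ _
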